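-- pv_equiv track=rewrite | github.com/sonsukwoo/server-agent | backend/src/api/main.py | _infer_primary_time
-- ===== SOURCE A (Python) =====
-- def _infer_primary_time(columns: list[dict]) -> str | None:
--     for col in columns:
--         if col.get("name") == "ts":
--             return "ts"
--     for col in columns:
--         if col.get("name") in {"time", "timestamp", "created_at"}:
--             return col.get("name")
--     return None
-- ===== SOURCE B (Python) =====
-- def _infer_primary_time(columns: list[dict]) -> str | None:
--     fallback = None
--     for col in columns:
--         name = col.get("name")
--         if name == "ts":
--             return "ts"
--         if fallback is None and name in {"time", "timestamp", "created_at"}: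
--             fallback = name
--     return fallback
-- ===== Notes on version B (the rewrite author's own statement) =====
-- stated objective: simpler
-- what changed: Replaces A's two sequential scans over columns with a single pass keeping a fallback accumulator: 'ts' returns immediately, otherwise the earliest fallback-named column is remembered.
import Mathlib
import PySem

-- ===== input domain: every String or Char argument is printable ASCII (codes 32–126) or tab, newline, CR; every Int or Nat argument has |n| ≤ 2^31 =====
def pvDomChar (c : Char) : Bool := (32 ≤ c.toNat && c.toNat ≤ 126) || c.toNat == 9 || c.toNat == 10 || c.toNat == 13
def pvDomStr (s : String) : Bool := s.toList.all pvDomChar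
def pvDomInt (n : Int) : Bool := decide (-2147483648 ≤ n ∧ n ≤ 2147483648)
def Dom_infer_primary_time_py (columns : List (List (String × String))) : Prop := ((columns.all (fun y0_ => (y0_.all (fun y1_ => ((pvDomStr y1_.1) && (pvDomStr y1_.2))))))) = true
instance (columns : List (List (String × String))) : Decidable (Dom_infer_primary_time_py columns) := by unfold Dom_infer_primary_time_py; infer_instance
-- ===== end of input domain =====

-- B replaces A's two sequential scans with a single pass keeping a fallback accumulator (objective: simpler).


-- ===== PORT A =====
-- col.get("name") on the association-list dict
def pvGetName (col : List (String × String)) : Option String :=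
  (PySem.Dict.mk col).get? "name"

-- first loop of A: return "ts" as soon as a column named "ts" is seen
def pvLoopTs (columns : List (List (String × String))) : Option String :=
  match columns with
  | [] => none
  | col :: rest => if pvGetName col == some "ts" then some "ts" else pvLoopTs rest

-- second loop of A: return the first fallback name
def pvLoopFallback (columns : List (List (String × String))) : Option String :=
  match columns with
  | [] => none
  | col :: rest =>
      let n := pvGetName col
      if n == some "time" || n == some "timestamp" || n == some "created_at" then n
      else pvLoopFallback rest

def infer_primary_time_py (columns : List (List (String × String))) : Option String :=
  match pvLoopTs columns with
  | some r => some r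
  | none => pvLoopFallback columns

-- ===== PORT B =====
-- single pass with a fallback accumulator
def pvLoopB (columns : List (List (String × String))) (fallback : Option String) : Option String :=
  match columns with
  | [] => fallback
  | col :: rest =>
      let n := pvGetName col
      if n == some "ts" then some "ts"
      else pvLoopB rest
        (if fallback == none && (n == some "time" || n == some "timestamp" || n == some "created_at")
         then n else fallback)

def infer_primary_time_py_alt (columns : List (List (String × String))) : Option String :=
  pvLoopB columns none

-- ===== PRECONDITION & SPEC =====
def Spec_infer_primary_time_py (columns : List (List (String × String))) (out : Option String) : Prop := out = infer_primary_time_py_alt columns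
instance (columns : List (List (String × String))) (out : Option String) : Decidable (Spec_infer_primary_time_py columns out) := by unfold Spec_infer_primary_time_py; infer_instance

-- ===== CLAIM (what is proved, stated in full; the proofs are below) =====
def Claim_equal_infer_primary_time_py : Prop := ∀ (columns : List (List (String × String))), Dom_infer_primary_time_py columns → Spec_infer_primary_time_py columns (infer_primary_time_py columns)

-- ===== LEMMAS AND PROOFS =====
-- B's loop, characterised by A's two loops: "ts" wins, otherwise the incoming
-- fallback wins, otherwise the first fallback name in the remaining columns.
theorem pvLoopB_eq (columns : List (List (String × String))) (fb : Option String) :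
    pvLoopB columns fb =
      match pvLoopTs columns with
      | some r => some r
      | none => match fb with
                | some v => some v
                | none => pvLoopFallback columns := by
  induction columns generalizing fb with
  | nil => cases fb <;> simp [pvLoopB, pvLoopTs, pvLoopFallback]
  | cons col rest ih =>
      simp only [pvLoopB, pvLoopTs, pvLoopFallback]
      by_cases hts : pvGetName col == some "ts"
      · simp [hts]
      · simp only [hts, if_false, Bool.false_eq_true, ih]
        cases fb with
        | some v => simp
        | none =>
            by_cases hc : (pvGetName col == some "time" || pvGetName col == some "timestamp"
                || pvGetName col == some "created_at") = true
            · simp only [hc, if_true]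
              rcases Bool.or_eq_true_iff.mp hc with h | h
              · rcases Bool.or_eq_true_iff.mp h with h | h <;>
                  simp [eq_of_beq h]
              · simp [eq_of_beq h]
            · simp [hc]

-- ===== VERDICT (by name: the statement is the Claim_ definition above) =====
theorem infer_primary_time_py_spec : Claim_equal_infer_primary_time_py := by
  intro columns _
  unfold Spec_infer_primary_time_py infer_primary_time_py infer_primary_time_py_alt
  rw [pvLoopB_eq]
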